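-- pv_equiv track=rewrite | github.com/rickykise/Crawling | crawling_webhard/webhard1_191128/crawling_dev/crawling/portal/naver/naver_news_test.py | checkMainNewsKeyword
-- ===== SOURCE A (Python) =====
-- def checkMainNewsKeyword(content, newsKey):
--     returnValue = {
--         'm' : None,
--         'r' : None
--     }
--
--     for s in newsKey.keys():
--         if content.find(s) != -1 :
--             for m in newsKey[s]:
--                 if content.find(m) != -1 :
--                     returnValue['m'] = m
--                     returnValue['r'] = s
--
--
--     return returnValue
-- ===== SOURCE B (Python) =====
-- def checkMainNewsKeyword(content, newsKey):
--     # scan keys back-to-front: the last qualifying (key, member) pair wins in A,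
--     # so the first hit found in reverse order is the answer; return early.
--     for s in reversed(newsKey):
--         if s in content:
--             for m in reversed(newsKey[s]):
--                 if m in content:
--                     return {'m': m, 'r': s}
--     return {'m': None, 'r': None}
-- ===== Notes on version B (the rewrite author's own statement) =====
-- stated objective: faster
-- what changed: B scans the dict items and each value list back-to-front and returns at the first substring hit (which is A's last-wins answer), instead of A's full forward sweep that keeps overwriting the result; the early exit skips all substring searches before the answer.
import Mathlib
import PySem

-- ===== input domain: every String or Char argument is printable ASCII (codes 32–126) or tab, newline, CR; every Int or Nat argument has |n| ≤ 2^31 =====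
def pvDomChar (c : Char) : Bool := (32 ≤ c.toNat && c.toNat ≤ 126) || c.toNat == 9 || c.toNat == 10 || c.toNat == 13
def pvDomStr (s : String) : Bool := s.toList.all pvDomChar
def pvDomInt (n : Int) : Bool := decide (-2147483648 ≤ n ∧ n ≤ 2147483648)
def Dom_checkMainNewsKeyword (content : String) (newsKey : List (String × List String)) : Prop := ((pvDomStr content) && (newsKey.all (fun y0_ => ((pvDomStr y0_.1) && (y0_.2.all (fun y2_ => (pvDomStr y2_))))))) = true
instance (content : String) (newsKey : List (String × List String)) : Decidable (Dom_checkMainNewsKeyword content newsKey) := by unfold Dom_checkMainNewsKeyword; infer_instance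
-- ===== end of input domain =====

-- B scans the dict items and each value list back-to-front and returns at the first
-- substring hit (A's last-wins answer), instead of A's full overwriting sweep.


-- ===== PORT A =====
-- literal port: build the dict, sweep all keys in order, overwrite rv on every hit
def checkMainNewsKeyword (content : String) (newsKey : List (String × List String)) : List (String × Option String) :=
  let d := PySem.Dict.ofList newsKey
  let rv := d.keys.foldl (fun (rv : Option String × Option String) s =>
      if PySem.Str.find content s ≠ -1 then
        (d.getD s []).foldl (fun rv m =>
          if PySem.Str.find content m ≠ -1 then (some m, some s) else rv) rv
      else rv) (none, none)
  [("m", rv.1), ("r", rv.2)]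

-- ===== PORT B =====
-- inner loop of B: first element of the list contained in content
def firstHit (content : String) : List String → Option String
  | [] => none
  | m :: rest => if PySem.Str.isIn m content then some m else firstHit content rest

-- outer loop of B: scan (already reversed) items, early return at the first full hit
def scanB (content : String) : List (String × List String) → Option String × Option String
  | [] => (none, none)
  | (s, ms) :: rest =>
    if PySem.Str.isIn s content then
      match firstHit content ms.reverse with
      | some m => (some m, some s)
      | none => scanB content rest
    else scanB content rest

def checkMainNewsKeyword_alt (content : String) (newsKey : List (String × List String)) : List (String × Option String) :=
  let d := PySem.Dict.ofList newsKey
  let rv := scanB content d.items.reverse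
  [("m", rv.1), ("r", rv.2)]

-- ===== PRECONDITION & SPEC =====
def Spec_checkMainNewsKeyword (content : String) (newsKey : List (String × List String)) (out : List (String × Option String)) : Prop := out = checkMainNewsKeyword_alt content newsKey
instance (content : String) (newsKey : List (String × List String)) (out : List (String × Option String)) : Decidable (Spec_checkMainNewsKeyword content newsKey out) := by unfold Spec_checkMainNewsKeyword; infer_instance

-- ===== CLAIM (what is proved, stated in full; the proofs are below) =====
def Claim_equal_checkMainNewsKeyword : Prop := ∀ (content : String) (newsKey : List (String × List String)), Dom_checkMainNewsKeyword content newsKey → Spec_checkMainNewsKeyword content newsKey (checkMainNewsKeyword content newsKey)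

-- ===== LEMMAS AND PROOFS =====

-- proof-side "find the first full hit, or none"
def fullHit (content : String) : List (String × List String) → Option (Option String × Option String)
  | [] => none
  | (s, ms) :: rest =>
    if PySem.Str.isIn s content then
      match firstHit content ms.reverse with
      | some m => some (some m, some s)
      | none => fullHit content rest
    else fullHit content rest

lemma scanB_eq_fullHit (content : String) (l : List (String × List String)) :
    scanB content l = (fullHit content l).getD (none, none) := by
  induction l with
  | nil => rfl
  | cons p rest ih =>
    obtain ⟨s, ms⟩ := p
    simp only [scanB, fullHit]
    split_ifs with h
    · cases firstHit content ms.reverse <;> simp [ih]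
    · exact ih

lemma firstHit_append (content : String) (l l' : List String) :
    firstHit content (l ++ l') = (firstHit content l).or (firstHit content l') := by
  induction l with
  | nil => rfl
  | cons m rest ih =>
    simp only [List.cons_append, firstHit]
    split_ifs with h <;> simp [ih]

lemma fullHit_append (content : String) (l l' : List (String × List String)) :
    fullHit content (l ++ l') = (fullHit content l).or (fullHit content l') := by
  induction l with
  | nil => rfl
  | cons p rest ih =>
    obtain ⟨s, ms⟩ := p
    simp only [List.cons_append, fullHit]
    split_ifs with h
    · cases firstHit content ms.reverse <;> simp [ih]
    · exact ih

lemma hit_if (content x : String) {α : Sort _} (a b : α) :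
    (if PySem.Str.find content x ≠ -1 then a else b)
      = (if PySem.Str.isIn x content then a else b) := by
  rw [PySem.Str.find_eq, PySem.Str.isIn_eq]
  by_cases h : x.toList <:+: content.toList
  · rw [if_pos ((PySem.Chars.find_ne_neg_one_iff _ _).mpr h),
        if_pos ((PySem.Chars.isIn_iff_infix _ _).mpr h)]
  · rw [if_neg (fun hc => h ((PySem.Chars.find_ne_neg_one_iff _ _).mp hc)),
        if_neg (fun hc => h ((PySem.Chars.isIn_iff_infix _ _).mp hc))]

-- A's inner overwrite loop computes the last hit = first hit of the reversed list
lemma inner_loop_eq (content s : String) (ms : List String)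
    (rv : Option String × Option String) :
    ms.foldl (fun rv m => if PySem.Str.find content m ≠ -1 then (some m, some s) else rv) rv
      = ((firstHit content ms.reverse).map (fun m => (some m, some s))).getD rv := by
  induction ms generalizing rv with
  | nil => rfl
  | cons m rest ih =>
    simp only [List.foldl_cons, List.reverse_cons, firstHit_append, ih]
    rw [hit_if content m]
    cases hfr : firstHit content rest.reverse with
    | some m' => simp
    | none => simp only [Option.none_or, firstHit]; split_ifs with h <;> simp

-- A's outer overwrite loop over item pairs = first full hit of the reversed items
lemma outer_loop_eq (content : String) (items : List (String × List String))
    (rv : Option String × Option String) :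
    items.foldl (fun rv p =>
        if PySem.Str.isIn p.1 content then
          ((firstHit content p.2.reverse).map (fun m => (some m, some p.1))).getD rv
        else rv) rv
      = (fullHit content items.reverse).getD rv := by
  induction items generalizing rv with
  | nil => rfl
  | cons p rest ih =>
    obtain ⟨s, ms⟩ := p
    simp only [List.foldl_cons, List.reverse_cons, fullHit_append, ih]
    cases hfr : fullHit content rest.reverse with
    | some r => simp
    | none =>
      simp only [Option.none_or, fullHit]
      split_ifs with h
      · cases firstHit content ms.reverse <;> simp
      · simp

-- the overwrite sweep over the dict keys equals B's early-exit reverse scan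
lemma rv_eq (content : String) (newsKey : List (String × List String)) :
    (PySem.Dict.ofList newsKey).keys.foldl (fun (rv : Option String × Option String) s =>
        if PySem.Str.find content s ≠ -1 then
          ((PySem.Dict.ofList newsKey).getD s []).foldl (fun rv m =>
            if PySem.Str.find content m ≠ -1 then (some m, some s) else rv) rv
        else rv) (none, none)
      = scanB content (PySem.Dict.ofList newsKey).items.reverse := by
  set d := PySem.Dict.ofList newsKey with hd
  have hnd : d.keys.Nodup := PySem.Dict.nodup_keys_ofList newsKey
  have hkeys : d.keys = d.items.map Prod.fst := rfl
  rw [hkeys, List.foldl_map]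
  rw [PySem.List.foldl_congr_mem _ _
      (fun rv p =>
        if PySem.Str.isIn p.1 content then
          ((firstHit content p.2.reverse).map (fun m => (some m, some p.1))).getD rv
        else rv) _
      (fun rv p hp => by
        rw [hit_if content p.1, PySem.Dict.getD_of_mem_items d hp hnd, inner_loop_eq])]
  rw [outer_loop_eq, scanB_eq_fullHit]

-- ===== VERDICT (by name: the statement is the Claim_ definition above) =====
theorem checkMainNewsKeyword_spec : Claim_equal_checkMainNewsKeyword := by
  intro content newsKey _
  show _ = _
  simp only [checkMainNewsKeyword, checkMainNewsKeyword_alt, rv_eq]
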